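-- pv_equiv track=rewrite | github.com/juanauli/Inversion-Sequences-Consecutive-Patterns-of-Length-3 | count_consec_patterns3.py | count012
-- ===== SOURCE A (Python) =====
-- def count012(sequence):
--     index = 0
--     counter = 0
--     while index < len(sequence) - 2:
--         if sequence[index] < sequence[index + 1] < sequence[index + 2]:
--             counter += 1
--         index += 1
--     return counter
-- ===== SOURCE B (Python) =====
-- def count012(sequence):
--     # Run-length decomposition: a maximal strictly increasing run of L elements
--     # contains exactly max(L - 2, 0) increasing consecutive triples.
--     total = 0
--     run = 1
--     for prev, cur in zip(sequence, sequence[1:]):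
--         if prev < cur:
--             run += 1
--         else:
--             total += max(run - 2, 0)
--             run = 1
--     return total + max(run - 2, 0)
-- ===== Notes on version B (the rewrite author's own statement) =====
-- stated objective: alternative
-- what changed: Replaced A's direct per-index triple test by a run-length decomposition: one pass maintains the length of the current maximal strictly increasing run and adds max(run-2,0) at each run break, since a run of L elements contains exactly max(L-2,0) increasing triples.
import Mathlib
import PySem

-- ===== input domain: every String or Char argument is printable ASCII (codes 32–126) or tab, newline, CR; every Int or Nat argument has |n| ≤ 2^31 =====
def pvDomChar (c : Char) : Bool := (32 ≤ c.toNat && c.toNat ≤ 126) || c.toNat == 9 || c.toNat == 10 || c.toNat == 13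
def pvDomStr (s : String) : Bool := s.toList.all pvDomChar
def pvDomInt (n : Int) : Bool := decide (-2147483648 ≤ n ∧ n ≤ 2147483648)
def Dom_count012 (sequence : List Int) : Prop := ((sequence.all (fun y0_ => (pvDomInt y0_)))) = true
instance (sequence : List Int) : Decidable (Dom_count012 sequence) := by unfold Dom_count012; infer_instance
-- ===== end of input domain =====

-- B replaces A's per-index triple test by a run-length decomposition: it tracks the
-- length of the current strictly increasing run and adds max(run-2,0) at each break.

-- ===== PORT A =====
-- while-loop of A: state (index, counter), condition index < len(sequence) - 2
def count012Loop (sequence : List Int) (index counter : Int) : Int :=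
  if _h : index < (sequence.length : Int) - 2 then
    count012Loop sequence (index + 1)
      (if (PySem.List.pyGet? sequence index).getD 0 < (PySem.List.pyGet? sequence (index + 1)).getD 0
          ∧ (PySem.List.pyGet? sequence (index + 1)).getD 0 < (PySem.List.pyGet? sequence (index + 2)).getD 0
       then counter + 1 else counter)
  else counter
termination_by ((sequence.length : Int) - 2 - index).toNat
decreasing_by omega

def count012 (sequence : List Int) : Int := count012Loop sequence 0 0

-- ===== PORT B =====
-- loop body of Source B: state (total, run), one pair (prev, cur) per step
def count012AltStep (tr : Int × Int) (p : Int × Int) : Int × Int :=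
  if p.1 < p.2 then (tr.1, tr.2 + 1) else (tr.1 + max (tr.2 - 2) 0, 1)

-- 'for prev, cur in zip(sequence, sequence[1:])' ported as a foldl over the zip; final 'total + max(run-2,0)'
def count012_alt (sequence : List Int) : Int :=
  let st := (sequence.zip (sequence.drop 1)).foldl count012AltStep (0, 1)
  st.1 + max (st.2 - 2) 0

-- ===== PRECONDITION & SPEC =====
def Spec_count012 (sequence : List Int) (out : Int) : Prop := out = count012_alt sequence
instance (sequence : List Int) (out : Int) : Decidable (Spec_count012 sequence out) := by unfold Spec_count012; infer_instance

-- ===== CLAIM (what is proved, stated in full; the proofs are below) =====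
def Claim_equal_count012 : Prop := ∀ (sequence : List Int), Dom_count012 sequence → Spec_count012 sequence (count012 sequence)

-- ===== LEMMAS AND PROOFS =====

-- ---- A-side lemmas ----

-- accumulator additivity of A's loop
theorem count012Loop_acc (sequence : List Int) (index counter : Int) :
    count012Loop sequence index counter = counter + count012Loop sequence index 0 := by
  generalize hn : ((sequence.length : Int) - 2 - index).toNat = n
  induction n generalizing index counter with
  | zero =>
    have h : ¬ index < (sequence.length : Int) - 2 := by omega
    conv_lhs => rw [count012Loop]
    conv_rhs => rw [count012Loop]
    simp [h]
  | succ n ih =>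
    have h : index < (sequence.length : Int) - 2 := by omega
    have h' : ((sequence.length : Int) - 2 - (index + 1)).toNat = n := by omega
    conv_lhs => rw [count012Loop]
    conv_rhs => rw [count012Loop]
    simp only [h, dif_pos]
    split_ifs with hc
    · rw [ih (index+1) (counter+1) h', ih (index+1) (0+1) h']; ring
    · rw [ih (index+1) counter h', ih (index+1) 0 h']

-- shifting the list left by one shifts the loop's start index
theorem count012Loop_shift (a : Int) (s : List Int) (index counter : Int) (hi : 0 ≤ index) :
    count012Loop (a :: s) (index + 1) counter = count012Loop s index counter := by
  have hget : ∀ k : Int, 0 ≤ k →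
      PySem.List.pyGet? (a :: s) (k + 1) = PySem.List.pyGet? s k := by
    intro k hk
    obtain ⟨m, rfl⟩ := Int.eq_ofNat_of_zero_le hk
    exact PySem.List.pyGet?_cons_succ a s m
  generalize hn : ((s.length : Int) - 2 - index).toNat = n
  induction n generalizing index counter with
  | zero =>
    have h2 : ¬ index < (s.length : Int) - 2 := by omega
    have h1 : ¬ index + 1 < ((a :: s).length : Int) - 2 := by simp; omega
    conv_lhs => rw [count012Loop]
    conv_rhs => rw [count012Loop]
    rw [dif_neg h1, dif_neg h2]
  | succ n ih =>
    have h2 : index < (s.length : Int) - 2 := by omega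
    have h1 : index + 1 < ((a :: s).length : Int) - 2 := by simp; omega
    have h' : ((s.length : Int) - 2 - (index + 1)).toNat = n := by omega
    conv_lhs => rw [count012Loop]
    conv_rhs => rw [count012Loop]
    simp only [h1, h2, dif_pos]
    have e0 := hget index hi
    have e1 := hget (index + 1) (by omega)
    have e2 : PySem.List.pyGet? (a :: s) (index + 1 + 2) = PySem.List.pyGet? s (index + 2) := by
      have h3 : index + 1 + 2 = (index + 2) + 1 := by ring
      rw [h3]; exact hget (index + 2) (by omega)
    rw [e0, e1, e2]
    exact ih (index + 1) _ (by omega) h'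

-- one-step recurrence for A on a list of length ≥ 3
theorem count012_cons3 (a b c : Int) (l : List Int) :
    count012 (a :: b :: c :: l) = (if a < b ∧ b < c then 1 else 0) + count012 (b :: c :: l) := by
  show count012Loop (a :: b :: c :: l) 0 0 = _
  rw [count012Loop]
  have h : (0 : Int) < ((a :: b :: c :: l).length : Int) - 2 := by simp; omega
  simp only [h, dif_pos]
  simp [PySem.List.pyGet?_of_nonneg]
  have sh := count012Loop_shift a (b :: c :: l) 0 (if a < b ∧ b < c then 1 else 0) (le_refl 0)
  norm_num at sh
  rw [sh, count012Loop_acc]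
  rfl

-- ---- B-side lemmas ----

-- B's fold over the pair list, as a function of the remaining list and the state
def gF (s : List Int) (st : Int × Int) : Int × Int :=
  (s.zip (s.drop 1)).foldl count012AltStep st

theorem gF_cons (a b : Int) (t : List Int) (st : Int × Int) :
    gF (a :: b :: t) st = gF (b :: t) (count012AltStep st (a, b)) := by
  simp [gF]

-- the accumulated total is additive
theorem gF_add (s : List Int) (t r : Int) :
    gF s (t, r) = (t + (gF s (0, r)).1, (gF s (0, r)).2) := by
  induction s generalizing t r with
  | nil => simp [gF]
  | cons a u ih =>
    cases u with
    | nil => simp [gF]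
    | cons b v =>
      rw [gF_cons, gF_cons]
      by_cases hab : a < b
      · simp only [count012AltStep, hab, if_pos]
        exact ih t (r + 1)
      · simp only [count012AltStep, hab, if_neg, not_false_iff]
        rw [ih (t + max (r - 2) 0) 1, ih (0 + max (r - 2) 0) 1]
        simp
        ring

-- B's result when started with run length r
def gRes (s : List Int) (r : Int) : Int :=
  (gF s (0, r)).1 + max ((gF s (0, r)).2 - 2) 0

theorem count012_alt_eq_gRes (s : List Int) : count012_alt s = gRes s 1 := rfl

theorem gRes_peel (a b : Int) (t : List Int) (r : Int) :
    gRes (a :: b :: t) r =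
      if a < b then gRes (b :: t) (r + 1) else max (r - 2) 0 + gRes (b :: t) 1 := by
  unfold gRes
  rw [gF_cons]
  by_cases hab : a < b
  · simp [count012AltStep, hab]
  · simp only [count012AltStep, hab, if_neg, not_false_iff]
    rw [gF_add (b :: t) (0 + max (r - 2) 0) 1]
    simp
    ring

-- extending the incoming run by one adds exactly one triple once the run has ≥ 2 elements
theorem gRes_succ (s : List Int) (r : Int) (hr : 2 ≤ r) :
    gRes s (r + 1) = 1 + gRes s r := by
  induction s generalizing r with
  | nil => simp [gRes, gF]; omega
  | cons a u ih =>
    cases u with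
    | nil => simp [gRes, gF]; omega
    | cons b v =>
      rw [gRes_peel, gRes_peel]
      by_cases hab : a < b
      · simp only [hab, if_pos]
        exact ih (r + 1) (by omega)
      · simp only [hab, if_neg, not_false_iff]
        omega

-- starting with run length 2 instead of 1 adds one triple iff the first step ascends
theorem gRes_two (b c : Int) (l : List Int) :
    gRes (b :: c :: l) 2 = (if b < c then 1 else 0) + gRes (b :: c :: l) 1 := by
  rw [gRes_peel, gRes_peel]
  by_cases hbc : b < c
  · simp only [hbc, if_pos]
    exact gRes_succ (c :: l) 2 (le_refl 2)
  · simp [hbc]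

-- one-step recurrence for B on a list of length ≥ 3
theorem count012_alt_cons3 (a b c : Int) (l : List Int) :
    count012_alt (a :: b :: c :: l) = (if a < b ∧ b < c then 1 else 0) + count012_alt (b :: c :: l) := by
  rw [count012_alt_eq_gRes, count012_alt_eq_gRes, gRes_peel]
  by_cases hab : a < b
  · simp only [hab, if_pos]
    have h2 : (1 : Int) + 1 = 2 := by norm_num
    rw [h2, gRes_two]
    by_cases hbc : b < c <;> simp [hbc]
  · simp [hab]

-- ===== VERDICT (by name: the statement is the Claim_ definition above) =====
theorem count012_spec : Claim_equal_count012 := by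
  intro s hd
  clear hd
  show count012 s = count012_alt s
  induction s with
  | nil =>
    show count012Loop [] 0 0 = _
    rw [count012Loop]
    norm_num [count012_alt]
  | cons a t ih =>
    cases t with
    | nil =>
      show count012Loop [a] 0 0 = _
      rw [count012Loop]
      norm_num [count012_alt]
    | cons b u =>
      cases u with
      | nil =>
        show count012Loop [a, b] 0 0 = _
        rw [count012Loop]
        by_cases hab : a < b <;> simp [count012_alt, count012AltStep, hab]
      | cons c l =>
        rw [count012_cons3, count012_alt_cons3, ih]
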